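-- pv_equiv track=rewrite | github.com/kaiiam/UO_revamp | qname_processing/SI_parser.py | canonical_nc_label
-- ===== SOURCE A (Python) =====
-- def canonical_nc_label(numerator_list, denominator_list, label_lan):
--     return_lst = []
--     # Case 1 no denominators
--     if not denominator_list:
--         for n in numerator_list:
--             return_lst.append(n[label_lan])
--     # case 2 no numerators
--     elif not numerator_list:
--         return_lst.append('reciprocal')
--         for d in denominator_list:
--             return_lst.append(d[label_lan])
--     # Case 3 mix of numerators and denominators
--     else:
--         for n in numerator_list:
--             return_lst.append(n[label_lan])
--         return_lst.append('per')
--         for d in denominator_list: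
--             return_lst.append(d[label_lan])
--     return ' '.join(return_lst)
-- ===== SOURCE B (Python) =====
-- def canonical_nc_label(numerator_list, denominator_list, label_lan):
--     # Build the result string directly, back to front, by recursion:
--     # no token list, no join.  `cat` prepends each item's label to the
--     # already-built suffix (None = nothing follows yet), inserting a
--     # space exactly when something follows.
--     def cat(items, suffix):
--         if not items:
--             return suffix
--         rest = cat(items[1:], suffix)
--         lbl = items[0][label_lan]
--         return lbl if rest is None else lbl + ' ' + rest
--
--     suffix = None
--     if denominator_list:
--         word = 'per' if numerator_list else 'reciprocal'
--         suffix = word + ' ' + cat(denominator_list, None)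
--     out = cat(numerator_list, suffix)
--     return out if out is not None else ''
-- ===== Notes on version B (the rewrite author's own statement) =====
-- stated objective: alternative
-- what changed: Replaces A's three-branch token-list-then-join construction by a single back-to-front recursion that builds the result string directly with an Option-string accumulator, inserting a space exactly when something follows; no intermediate list and no join.
import Mathlib
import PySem

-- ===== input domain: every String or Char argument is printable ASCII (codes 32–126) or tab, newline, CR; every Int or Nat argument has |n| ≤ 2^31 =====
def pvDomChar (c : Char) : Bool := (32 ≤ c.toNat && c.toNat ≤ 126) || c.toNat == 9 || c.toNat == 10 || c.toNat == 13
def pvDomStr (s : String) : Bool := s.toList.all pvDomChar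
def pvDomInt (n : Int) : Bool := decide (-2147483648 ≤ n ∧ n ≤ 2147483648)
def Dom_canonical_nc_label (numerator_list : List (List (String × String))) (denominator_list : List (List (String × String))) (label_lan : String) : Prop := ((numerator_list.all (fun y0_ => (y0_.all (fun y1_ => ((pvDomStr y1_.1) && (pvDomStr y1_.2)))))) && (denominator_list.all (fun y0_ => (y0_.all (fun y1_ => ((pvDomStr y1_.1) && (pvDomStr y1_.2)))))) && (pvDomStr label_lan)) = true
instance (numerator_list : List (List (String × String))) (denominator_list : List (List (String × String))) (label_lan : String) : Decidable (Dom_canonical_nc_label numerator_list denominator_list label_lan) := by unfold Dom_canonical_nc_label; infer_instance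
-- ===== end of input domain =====

-- B builds the result string directly, back to front, by a recursion with an Option-string
-- accumulator (no token list, no join), replacing A's three-branch list-then-join construction
-- (objective: alternative).


-- d[k] on a Python dict given as an association list; Pre_ guarantees the key is present,
-- so the "" default is never reached on admitted inputs (exact there).
def pvDictGet (d : List (String × String)) (k : String) : String :=
  ((PySem.Dict.ofList d).get? k).getD ""

-- ===== PORT A =====
def canonical_nc_label (numerator_list : List (List (String × String))) (denominator_list : List (List (String × String))) (label_lan : String) : String :=
  let return_lst : List String := []
  let return_lst :=
    if denominator_list = [] then
      -- Case 1 no denominators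
      numerator_list.foldl (fun acc n => acc ++ [pvDictGet n label_lan]) return_lst
    else if numerator_list = [] then
      -- case 2 no numerators
      denominator_list.foldl (fun acc d => acc ++ [pvDictGet d label_lan]) (return_lst ++ ["reciprocal"])
    else
      -- Case 3 mix of numerators and denominators
      denominator_list.foldl (fun acc d => acc ++ [pvDictGet d label_lan])
        ((numerator_list.foldl (fun acc n => acc ++ [pvDictGet n label_lan]) return_lst) ++ ["per"])
  PySem.Str.join " " return_lst

-- ===== PORT B =====
-- B's inner recursive helper `cat`: prepend the items' labels to the suffix built so far
-- (none = nothing follows yet), adding a space exactly when something follows.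
def pvCat (label_lan : String) (items : List (List (String × String))) (suffix : Option String) : Option String :=
  match items with
  | [] => suffix
  | x :: rest_items =>
    let rest := pvCat label_lan rest_items suffix
    let lbl := pvDictGet x label_lan
    some (match rest with
          | none => lbl
          | some r => lbl ++ " " ++ r)

def canonical_nc_label_alt (numerator_list : List (List (String × String))) (denominator_list : List (List (String × String))) (label_lan : String) : String :=
  let suffix : Option String :=
    if denominator_list ≠ [] then
      let word := if numerator_list ≠ [] then "per" else "reciprocal"
      -- denominator_list ≠ [] makes pvCat return some; the none branch is unreachable
      match pvCat label_lan denominator_list none with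
      | some s => some (word ++ " " ++ s)
      | none => none
    else none
  let out := pvCat label_lan numerator_list suffix
  match out with
  | some s => s
  | none => ""

-- ===== PRECONDITION & SPEC =====
-- Pre_ excludes exactly the inputs where n[label_lan] raises KeyError: some entry dict lacks the key.
def Pre_canonical_nc_label (numerator_list : List (List (String × String))) (denominator_list : List (List (String × String))) (label_lan : String) : Prop :=
  ((numerator_list ++ denominator_list).all (fun d => (PySem.Dict.ofList d).contains label_lan)) = true
instance (numerator_list : List (List (String × String))) (denominator_list : List (List (String × String))) (label_lan : String) : Decidable (Pre_canonical_nc_label numerator_list denominator_list label_lan) := by unfold Pre_canonical_nc_label; infer_instance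

def pvWitness_canonical_nc_label : (List (List (String × String))) × (List (List (String × String))) × String :=
  ([[("en", "metre")]], [[("en", "second")]], "en")

def Spec_canonical_nc_label (numerator_list : List (List (String × String))) (denominator_list : List (List (String × String))) (label_lan : String) (out : String) : Prop := out = canonical_nc_label_alt numerator_list denominator_list label_lan
instance (numerator_list : List (List (String × String))) (denominator_list : List (List (String × String))) (label_lan : String) (out : String) : Decidable (Spec_canonical_nc_label numerator_list denominator_list label_lan out) := by unfold Spec_canonical_nc_label; infer_instance

-- ===== CLAIM (what is proved, stated in full; the proofs are below) =====
def Claim_equal_canonical_nc_label : Prop := ∀ (numerator_list : List (List (String × String))) (denominator_list : List (List (String × String))) (label_lan : String), Dom_canonical_nc_label numerator_list denominator_list label_lan → Pre_canonical_nc_label numerator_list denominator_list label_lan → Spec_canonical_nc_label numerator_list denominator_list label_lan (canonical_nc_label numerator_list denominator_list label_lan)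

-- ===== LEMMAS AND PROOFS =====
theorem pvJoin_nil : PySem.Str.join " " [] = "" := by
  simp [PySem.Str.join, PySem.Chars.join, List.intercalate]

theorem pvJoin_singleton (s : String) : PySem.Str.join " " [s] = s := by
  simp [PySem.Str.join, PySem.Chars.join, List.intercalate]

theorem pvJoin_cons (a : String) (l : List String) (h : l ≠ []) :
    PySem.Str.join " " (a :: l) = a ++ " " ++ PySem.Str.join " " l := by
  obtain ⟨b, t, rfl⟩ := List.exists_cons_of_ne_nil h
  simp [PySem.Str.join, PySem.Chars.join, List.intercalate, List.intersperse_cons₂]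
  rw [String.append_assoc, show (" " : String) = String.ofList [' '] from rfl,
    ← String.ofList_append]
  rfl

theorem pvJoin_append (l m : List String) (hm : m ≠ []) :
    PySem.Str.join " " (l ++ m) =
      (if l = [] then PySem.Str.join " " m
       else PySem.Str.join " " l ++ " " ++ PySem.Str.join " " m) := by
  induction l with
  | nil => simp
  | cons a t ih =>
    have hne : t ++ m ≠ [] := by simp [hm]
    by_cases ht : t = []
    · subst ht; simp [pvJoin_cons a m hm, pvJoin_singleton]
    · simp only [List.cons_append, pvJoin_cons a (t ++ m) hne, ih, ht,
        pvJoin_cons a t ht]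
      simp [String.append_assoc]

theorem pvCat_none (lan : String) (xs : List (List (String × String))) (h : xs ≠ []) :
    pvCat lan xs none = some (PySem.Str.join " " (xs.map (fun d => pvDictGet d lan))) := by
  induction xs with
  | nil => exact absurd rfl h
  | cons x t ih =>
    by_cases ht : t = []
    · subst ht; simp [pvCat, pvJoin_singleton]
    · simp only [pvCat, ih ht, List.map_cons,
        pvJoin_cons (pvDictGet x lan) (List.map (fun d => pvDictGet d lan) t) (by simp [ht])]

theorem pvCat_some (lan : String) (xs : List (List (String × String))) (s : String) :
    pvCat lan xs (some s) =
      some (PySem.Str.join " " (xs.map (fun d => pvDictGet d lan) ++ [s])) := by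
  induction xs with
  | nil => simp [pvCat, pvJoin_singleton]
  | cons x t ih =>
    simp only [pvCat, ih, List.map_cons, List.cons_append,
      pvJoin_cons (pvDictGet x lan) (List.map (fun d => pvDictGet d lan) t ++ [s]) (by simp)]

-- ===== VERDICT (by name: the statement is the Claim_ definition above) =====
theorem canonical_nc_label_spec : Claim_equal_canonical_nc_label := by
  intro nl dl lan _ _
  unfold Spec_canonical_nc_label canonical_nc_label canonical_nc_label_alt
  simp only [PySem.List.foldl_append_singleton_eq_map, List.nil_append]
  by_cases hd : dl = []
  · subst hd
    by_cases hn : nl = []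
    · simp [hn, pvCat, pvJoin_nil]
    · simp [pvCat_none lan nl hn]
  · by_cases hn : nl = []
    · subst hn
      simp [hd, pvCat_none lan dl hd, pvCat, pvJoin_cons]
    · simp [hd, hn, pvCat_none lan dl hd, pvCat_some, pvJoin_cons, pvJoin_append, pvJoin_singleton]
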